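-- pv_equiv track=rewrite | github.com/nderkach/algorithmic-challenges | flight_length.py | movies_pairs_close
-- ===== SOURCE A (Python) =====
-- def movies_pairs_close(movie_lengths, flight_length, trange):
--     diffs = {}
--     pairs = []
--     for m in movie_lengths:
--         if m in diffs:
--             pairs.append((diffs[m], m))
--         else:
--             for i in range(flight_length-m-trange, flight_length-m+trange+1):
--                 diffs[i] = flight_length-m
--
--     return pairs
-- ===== SOURCE B (Python) =====
-- def movies_pairs_close(movie_lengths, flight_length, trange):
--     # interval stack instead of a materialized dict over the whole range:
--     # each unseen movie contributes one interval [fl-m-trange, fl-m+trange] -> fl-m;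
--     # membership/lookup = first covering interval scanning newest-first
--     # (newest wins, exactly like dict overwrite).
--     intervals = []  # (lo, hi, val), newest first
--     pairs = []
--     for m in movie_lengths:
--         for lo, hi, val in intervals:
--             if lo <= m <= hi:
--                 pairs.append((val, m))
--                 break
--         else:
--             lo = flight_length - m - trange
--             hi = flight_length - m + trange
--             if lo <= hi:
--                 intervals.insert(0, (lo, hi, flight_length - m))
--     return pairs
-- ===== Notes on version B (the rewrite author's own statement) =====
-- stated objective: alternative
-- what changed: replaces the dict materializing every key in a 2*trange+1 window with a newest-first stack of (lo,hi,val) intervals queried by a covering scan, so memory and insert cost no longer depend on trange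
import Mathlib
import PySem

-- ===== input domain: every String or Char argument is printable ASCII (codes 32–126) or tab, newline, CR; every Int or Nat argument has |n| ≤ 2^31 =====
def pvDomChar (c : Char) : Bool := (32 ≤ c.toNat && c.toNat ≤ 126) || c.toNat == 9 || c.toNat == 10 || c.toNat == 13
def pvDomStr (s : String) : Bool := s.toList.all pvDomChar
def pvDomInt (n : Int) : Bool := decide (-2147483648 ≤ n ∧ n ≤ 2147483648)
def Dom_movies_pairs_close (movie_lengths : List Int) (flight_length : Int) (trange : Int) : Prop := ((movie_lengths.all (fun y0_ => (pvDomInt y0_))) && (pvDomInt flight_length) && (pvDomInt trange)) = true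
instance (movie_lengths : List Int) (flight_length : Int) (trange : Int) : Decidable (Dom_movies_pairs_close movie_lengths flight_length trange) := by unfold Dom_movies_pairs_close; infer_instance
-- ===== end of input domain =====

-- B replaces A's trange-sized dict fill with a newest-first interval stack (same return value; no speed claim).

-- ===== PORT A =====
-- one iteration of A's outer loop: state = (diffs dict, pairs so far)
def mpcA_step (fl tr : Int) (st : PySem.Dict Int Int × List (Int × Int)) (m : Int) :
    PySem.Dict Int Int × List (Int × Int) :=
  if st.1.contains m then
    (st.1, st.2 ++ [(st.1.getD m 0, m)])   -- getD exact: contains guarantees the key is present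
  else
    ((PySem.List.pyRange (fl - m - tr) (fl - m + tr + 1) 1).foldl
        (fun d i => d.insert i (fl - m)) st.1,
     st.2)

def movies_pairs_close (movie_lengths : List Int) (flight_length : Int) (trange : Int) : List (Int × Int) :=
  (movie_lengths.foldl (mpcA_step flight_length trange) (PySem.Dict.empty, [])).2

-- ===== PORT B =====
-- lookup: first covering interval, newest first (the stack is kept newest-first)
def mpcB_find (intervals : List (Int × Int × Int)) (m : Int) : Option Int :=
  (intervals.find? (fun t => decide (t.1 ≤ m) && decide (m ≤ t.2.1))).map (·.2.2)

def mpcB_step (fl tr : Int) (st : List (Int × Int × Int) × List (Int × Int)) (m : Int) :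
    List (Int × Int × Int) × List (Int × Int) :=
  match mpcB_find st.1 m with
  | some v => (st.1, st.2 ++ [(v, m)])
  | none =>
      if fl - m - tr ≤ fl - m + tr then
        ((fl - m - tr, fl - m + tr, fl - m) :: st.1, st.2)
      else st

def movies_pairs_close_alt (movie_lengths : List Int) (flight_length : Int) (trange : Int) : List (Int × Int) :=
  (movie_lengths.foldl (mpcB_step flight_length trange) ([], [])).2

-- ===== PRECONDITION & SPEC =====
def Spec_movies_pairs_close (movie_lengths : List Int) (flight_length : Int) (trange : Int) (out : List (Int × Int)) : Prop := out = movies_pairs_close_alt movie_lengths flight_length trange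
instance (movie_lengths : List Int) (flight_length : Int) (trange : Int) (out : List (Int × Int)) : Decidable (Spec_movies_pairs_close movie_lengths flight_length trange out) := by unfold Spec_movies_pairs_close; infer_instance

-- ===== CLAIM (what is proved, stated in full; the proofs are below) =====
def Claim_equal_movies_pairs_close : Prop := ∀ (movie_lengths : List Int) (flight_length : Int) (trange : Int), Dom_movies_pairs_close movie_lengths flight_length trange → Spec_movies_pairs_close movie_lengths flight_length trange (movies_pairs_close movie_lengths flight_length trange)

-- ===== LEMMAS AND PROOFS =====

-- a constant-value insert loop: lookup is "in the list, else old"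
lemma get?_foldl_insert_const (l : List Int) (d : PySem.Dict Int Int) (v k : Int) :
    (l.foldl (fun d i => d.insert i v) d).get? k = if k ∈ l then some v else d.get? k := by
  induction l generalizing d with
  | nil => simp
  | cons x xs ih =>
      simp only [List.foldl_cons, ih, List.mem_cons]
      by_cases hx : k ∈ xs
      · simp [hx]
      · by_cases hk : k = x
        · simp [hk, PySem.Dict.get?_insert_self]
        · simp [hx, hk, PySem.Dict.get?_insert_of_ne _ _ hk]

lemma mpcB_find_cons (lo hi v : Int) (ints : List (Int × Int × Int)) (k : Int) :
    mpcB_find ((lo, hi, v) :: ints) k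
      = if lo ≤ k ∧ k ≤ hi then some v else mpcB_find ints k := by
  simp only [mpcB_find, List.find?_cons]
  by_cases h : lo ≤ k ∧ k ≤ hi
  · simp [h.1, h.2]
  · rcases not_and_or.mp h with h1 | h1 <;> simp [h1]

-- the loop invariant: every dict lookup equals the interval-stack lookup
lemma mpc_loop_eq (fl tr : Int) (ms : List Int) :
    ∀ (d : PySem.Dict Int Int) (ints : List (Int × Int × Int)) (pairs : List (Int × Int)),
      (∀ k, d.get? k = mpcB_find ints k) →
      (ms.foldl (mpcA_step fl tr) (d, pairs)).2 = (ms.foldl (mpcB_step fl tr) (ints, pairs)).2 := by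
  induction ms with
  | nil => intro d ints pairs _; rfl
  | cons m rest ih =>
      intro d ints pairs hinv
      simp only [List.foldl_cons]
      have hc : d.contains m = (mpcB_find ints m).isSome := by
        rw [PySem.Dict.contains_eq_isSome_get?, hinv m]
      cases hfind : mpcB_find ints m with
      | some v =>
          have hget : d.get? m = some v := (hinv m).trans hfind
          have hA : mpcA_step fl tr (d, pairs) m = (d, pairs ++ [(v, m)]) := by
            simp [mpcA_step, hc, hfind, PySem.Dict.getD_of_get?_eq_some _ _ hget]
          have hB : mpcB_step fl tr (ints, pairs) m = (ints, pairs ++ [(v, m)]) := by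
            simp [mpcB_step, hfind]
          rw [hA, hB]; exact ih _ _ _ hinv
      | none =>
          have hA : mpcA_step fl tr (d, pairs) m
              = ((PySem.List.pyRange (fl - m - tr) (fl - m + tr + 1) 1).foldl
                    (fun d i => d.insert i (fl - m)) d, pairs) := by
            simp [mpcA_step, hc, hfind]
          rw [hA]
          have hgetr : ∀ k, ((PySem.List.pyRange (fl - m - tr) (fl - m + tr + 1) 1).foldl
                (fun d i => d.insert i (fl - m)) d).get? k
              = if fl - m - tr ≤ k ∧ k ≤ fl - m + tr then some (fl - m) else mpcB_find ints k := by
            intro k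
            rw [get?_foldl_insert_const]
            by_cases hm : fl - m - tr ≤ k ∧ k ≤ fl - m + tr
            · rw [if_pos (by rw [PySem.List.mem_pyRange_one]; omega), if_pos hm]
            · rw [if_neg (by rw [PySem.List.mem_pyRange_one]; omega), if_neg hm]
              exact hinv k
          by_cases hle : fl - m - tr ≤ fl - m + tr
          · have hB : mpcB_step fl tr (ints, pairs) m
                = ((fl - m - tr, fl - m + tr, fl - m) :: ints, pairs) := by
              simp [mpcB_step, hfind, hle]
            rw [hB]
            exact ih _ _ _ (fun k => by rw [hgetr k, mpcB_find_cons])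
          · have hB : mpcB_step fl tr (ints, pairs) m = (ints, pairs) := by
              simp [mpcB_step, hfind, hle]
            rw [hB]
            refine ih _ _ _ (fun k => ?_)
            rw [hgetr k, if_neg (by omega)]

-- ===== VERDICT (by name: the statement is the Claim_ definition above) =====
theorem movies_pairs_close_spec : Claim_equal_movies_pairs_close := by
  intro ml fl tr _
  unfold Spec_movies_pairs_close movies_pairs_close movies_pairs_close_alt
  exact mpc_loop_eq fl tr ml _ _ _ (fun k => by simp [mpcB_find, PySem.Dict.get?_empty])
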